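-- pv_equiv track=rewrite | github.com/oturing/python2001 | cgi-bin/dic_util.py | digi_split
-- ===== SOURCE A (Python) =====
-- def digi_split(texto):
-- 	DIGI = '0123456789'
-- 	# separa partes numéricas e não numéricas do texto
-- 	lt_nova = []
-- 	item = ''
-- 	digi_flag = 0
-- 	for car in texto:
-- 		if digi_flag:
-- 			if car in DIGI:
-- 				item = item + car
-- 			else:
-- 				if item:
-- 					lt_nova.append(item)
-- 				item = car
-- 				digi_flag = 0
-- 		else:
-- 			if car in DIGI:
-- 				if item:
-- 					lt_nova.append(item)
-- 				item = car
-- 				digi_flag = 1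
-- 			else:
-- 				item = item + car
-- 	if item: lt_nova.append(item)
-- 	return lt_nova
-- ===== SOURCE B (Python) =====
-- def digi_split(texto):
--     DIGI = '0123456789'
--     # staged passes: first compute the cut indices where the digit/non-digit
--     # class changes, then slice the text between consecutive cuts
--     n = len(texto)
--     cuts = [i for i in range(n)
--             if i == 0 or (texto[i] in DIGI) != (texto[i - 1] in DIGI)] + [n]
--     return [texto[a:b] for a, b in zip(cuts, cuts[1:])]
-- ===== Notes on version B (the rewrite author's own statement) =====
-- stated objective: alternative
-- what changed: Replaced A's single-pass item/digi_flag state machine with a staged approach: first compute the list of cut indices where the digit class changes, then return the slices between consecutive cuts.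
import Mathlib
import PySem

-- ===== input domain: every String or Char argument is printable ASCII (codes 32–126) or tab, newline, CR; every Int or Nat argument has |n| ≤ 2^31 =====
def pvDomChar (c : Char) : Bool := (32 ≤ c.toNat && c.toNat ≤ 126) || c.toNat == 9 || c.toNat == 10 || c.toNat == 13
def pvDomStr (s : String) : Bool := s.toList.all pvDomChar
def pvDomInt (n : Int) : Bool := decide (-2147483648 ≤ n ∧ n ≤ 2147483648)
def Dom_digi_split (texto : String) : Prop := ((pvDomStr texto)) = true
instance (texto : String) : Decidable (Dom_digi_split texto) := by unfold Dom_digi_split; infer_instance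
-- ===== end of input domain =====

-- B replaces A's item/digi_flag state machine by two staged passes: compute the cut indices
-- where the digit class changes, then slice between consecutive cuts (alternative; same cost).

-- ===== PORT A =====
-- one loop iteration of A: state = (lt_nova, item, digi_flag)
def pvStepA (st : List (List Char) × List Char × Bool) (car : Char) :
    List (List Char) × List Char × Bool :=
  match st with
  | (lt_nova, item, digi_flag) =>
    if digi_flag then
      if ("0123456789".toList).contains car then (lt_nova, item ++ [car], digi_flag)
      else ((if item.isEmpty then lt_nova else lt_nova ++ [item]), [car], false)
    else
      if ("0123456789".toList).contains car then
        ((if item.isEmpty then lt_nova else lt_nova ++ [item]), [car], true)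
      else (lt_nova, item ++ [car], digi_flag)

def digi_split (texto : String) : List String :=
  match texto.toList.foldl pvStepA ([], [], false) with
  | (lt_nova, item, _) =>
      (if item.isEmpty then lt_nova else lt_nova ++ [item]).map String.mk

-- ===== PORT B =====
def pvIsDigi (c : Char) : Bool := ("0123456789".toList).contains c

-- cuts = [i for i in range(n) if i == 0 or (texto[i] in DIGI) != (texto[i-1] in DIGI)] + [n]
-- (indexing via getD is exact here: every index used is in range)
def pvCuts (cs : List Char) : List Nat :=
  ((List.range cs.length).filter
      (fun i => i == 0 || (pvIsDigi (cs.getD i ' ') != pvIsDigi (cs.getD (i - 1) ' ')))) ++ [cs.length]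

-- [texto[a:b] for a, b in zip(cuts, cuts[1:])]; texto[a:b] with 0 ≤ a ≤ b is (drop a).take (b-a)
def digi_split_alt (texto : String) : List String :=
  let cs := texto.toList
  let cuts := pvCuts cs
  (cuts.zip cuts.tail).map (fun p => String.mk (((cs.drop p.1).take (p.2 - p.1))))

-- ===== PRECONDITION & SPEC =====
def Spec_digi_split (texto : String) (out : List String) : Prop := out = digi_split_alt texto
instance (texto : String) (out : List String) : Decidable (Spec_digi_split texto out) := by unfold Spec_digi_split; infer_instance

-- ===== CLAIM (what is proved, stated in full; the proofs are below) =====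
def Claim_equal_digi_split : Prop := ∀ (texto : String), Dom_digi_split texto → Spec_digi_split texto (digi_split texto)

-- ===== LEMMAS AND PROOFS =====

-- common specification: the maximal runs of equal digit-class
def pvRuns : List Char → List (List Char)
  | [] => []
  | c :: cs =>
      (c :: cs.takeWhile (fun d => pvIsDigi d == pvIsDigi c)) ::
        pvRuns (cs.dropWhile (fun d => pvIsDigi d == pvIsDigi c))
  termination_by cs => cs.length
  decreasing_by
    simp only [List.length_cons]
    exact Nat.lt_succ_of_le (List.length_dropWhile_le _ cs)

theorem pvRuns_nil : pvRuns [] = [] := by simp [pvRuns]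

theorem pvRuns_cons (c : Char) (cs : List Char) :
    pvRuns (c :: cs) =
      (c :: cs.takeWhile (fun d => pvIsDigi d == pvIsDigi c)) ::
        pvRuns (cs.dropWhile (fun d => pvIsDigi d == pvIsDigi c)) := by simp [pvRuns]

-- A's run accumulator, reformulated as structural recursion
def pvRunsWith (k : Bool) (item : List Char) : List Char → List (List Char)
  | [] => [item]
  | c :: cs =>
      if pvIsDigi c = k then pvRunsWith k (item ++ [c]) cs
      else item :: pvRunsWith (pvIsDigi c) [c] cs

theorem pvStepA_char (acc : List (List Char)) (item : List Char) (flag : Bool) (c : Char) :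
    pvStepA (acc, item, flag) c =
      if pvIsDigi c = flag then (acc, item ++ [c], flag)
      else ((if item.isEmpty then acc else acc ++ [item]), [c], pvIsDigi c) := by
  unfold pvStepA pvIsDigi
  cases flag <;> cases h : ("0123456789".toList).contains c <;> simp [h]

theorem pvRunsWith_eq (cs : List Char) : ∀ (k : Bool) (item : List Char),
    pvRunsWith k item cs =
      (item ++ cs.takeWhile (fun d => pvIsDigi d == k)) ::
        pvRuns (cs.dropWhile (fun d => pvIsDigi d == k)) := by
  induction cs with
  | nil => intro k item; simp [pvRunsWith, pvRuns_nil]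
  | cons c cs ih =>
    intro k item
    have hb : (pvIsDigi c == k) = decide (pvIsDigi c = k) := by
      cases pvIsDigi c <;> cases k <;> rfl
    by_cases h : pvIsDigi c = k
    · rw [pvRunsWith, if_pos h, ih, List.takeWhile_cons, List.dropWhile_cons, hb]
      simp [h]
    · rw [pvRunsWith, if_neg h, ih (pvIsDigi c) [c], List.takeWhile_cons,
        List.dropWhile_cons, hb]
      simp only [h, decide_false, Bool.false_eq_true, if_false]
      rw [pvRuns_cons]
      simp

def pvFinish (st : List (List Char) × List Char × Bool) : List (List Char) :=
  if st.2.1.isEmpty then st.1 else st.1 ++ [st.2.1]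

theorem pvFoldA_eq (cs : List Char) :
    ∀ (acc : List (List Char)) (item : List Char) (flag : Bool), item ≠ [] →
      pvFinish (cs.foldl pvStepA (acc, item, flag)) = acc ++ pvRunsWith flag item cs := by
  induction cs with
  | nil => intro acc item flag h; simp [pvFinish, pvRunsWith, List.isEmpty_iff, h]
  | cons c cs ih =>
    intro acc item flag h
    rw [List.foldl_cons, pvStepA_char]
    by_cases hd : pvIsDigi c = flag
    · rw [if_pos hd, ih _ _ _ (by simp), pvRunsWith]
      rw [if_pos hd]
    · rw [if_neg hd, if_neg (by simpa [List.isEmpty_iff] using h),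
        ih _ _ _ (by simp), pvRunsWith, if_neg hd]
      simp [List.append_assoc]

theorem digi_split_eq_runs (texto : String) :
    digi_split texto = (pvRuns texto.toList).map String.mk := by
  unfold digi_split
  cases hcs : texto.toList with
  | nil => simp [pvRuns_nil]
  | cons c cs =>
    have h0 : (c :: cs).foldl pvStepA ([], [], false) =
        cs.foldl pvStepA ([], [c], pvIsDigi c) := by
      rw [List.foldl_cons, pvStepA_char]
      cases hd : pvIsDigi c <;> simp [hd]
    have h := pvFoldA_eq cs [] [c] (pvIsDigi c) (by simp)
    rw [h0]
    rcases hst : cs.foldl pvStepA ([], [c], pvIsDigi c) with ⟨a, i, f⟩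
    rw [hst] at h
    simp only [pvFinish] at h
    rw [pvRunsWith_eq] at h
    rw [pvRuns_cons]
    simp only [List.isEmpty_iff] at h
    simp [h]

-- ===== B-side lemmas =====

def pvBCore (cs : List Char) : List (List Char) :=
  let cuts := pvCuts cs
  (cuts.zip cuts.tail).map (fun p => (cs.drop p.1).take (p.2 - p.1))

theorem digi_split_alt_eq_core (texto : String) :
    digi_split_alt texto = (pvBCore texto.toList).map String.mk := by
  simp [digi_split_alt, pvBCore, List.map_map, Function.comp]

theorem pvCuts_head (r : List Char) : ∃ qs, pvCuts r = 0 :: qs := by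
  cases r with
  | nil => exact ⟨[], rfl⟩
  | cons x xs =>
    unfold pvCuts
    rw [List.length_cons, List.range_succ_eq_map, List.filter_cons]
    simp

theorem pvHead_dropWhile (p : Char → Bool) (l : List Char) :
    ∀ y, (l.dropWhile p).head? = some y → p y = false := by
  induction l with
  | nil => intro y h; simp at h
  | cons c cs ih =>
    intro y h
    rw [List.dropWhile_cons] at h
    by_cases hc : p c = true
    · rw [if_pos hc] at h; exact ih y h
    · rw [if_neg hc] at h
      simp at h
      subst h
      simpa using hc

-- structure of the cuts of a string starting with a maximal run x :: t
theorem pvCuts_cons (x : Char) (t r : List Char)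
    (ht : ∀ d ∈ t, pvIsDigi d = pvIsDigi x)
    (hr : ∀ y, r.head? = some y → pvIsDigi y ≠ pvIsDigi x) :
    pvCuts ((x :: t) ++ r) = 0 :: (pvCuts r).map (· + (t.length + 1)) := by
  set m := t.length + 1 with hm
  set cs := (x :: t) ++ r with hcs
  have hxtlen : (x :: t).length = m := by simp [hm]
  have hlen : cs.length = m + r.length := by simp [hcs, hm]; omega
  have hgetlow : ∀ i < m, pvIsDigi (cs.getD i ' ') = pvIsDigi x := by
    intro i hi
    have hxt : cs.getD i ' ' = (x :: t).getD i ' ' := by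
      have hil : i < (x :: t).length := by omega
      simp only [List.getD, hcs]
      rw [List.getElem?_append_left hil]
    rw [hxt]
    cases i with
    | zero => simp
    | succ j =>
      have hj : j < t.length := by omega
      have hjt : (x :: t).getD (j + 1) ' ' = t.getD j ' ' := by simp [List.getD]
      rw [hjt]
      exact ht _ (by simpa [List.getD, List.getElem?_eq_getElem hj] using
        (List.getElem_mem hj))
  have hgethigh : ∀ i, cs.getD (m + i) ' ' = r.getD i ' ' := by
    intro i
    have := List.getElem?_append_right (l₁ := x :: t) (l₂ := r) (i := m + i) (by omega)
    simp only [List.getD, hcs, this, hxtlen, Nat.add_sub_cancel_left]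
  unfold pvCuts
  rw [hlen, List.range_add, List.filter_append]
  have hlow : ((List.range m).filter
      (fun i => i == 0 || (pvIsDigi (cs.getD i ' ') != pvIsDigi (cs.getD (i - 1) ' ')))) = [0] := by
    rw [hm, List.range_succ_eq_map, List.filter_cons]
    simp only [beq_self_eq_true, Bool.true_or, if_true]
    have : ((List.range t.length).map Nat.succ).filter
        (fun i => i == 0 || (pvIsDigi (cs.getD i ' ') != pvIsDigi (cs.getD (i - 1) ' '))) = [] := by
      rw [List.filter_eq_nil_iff]
      intro a ha
      simp only [List.mem_map, List.mem_range] at ha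
      obtain ⟨j, hj, rfl⟩ := ha
      have h1 : pvIsDigi (cs.getD (j + 1) ' ') = pvIsDigi x := hgetlow _ (by omega)
      have h2 : pvIsDigi (cs.getD (j + 1 - 1) ' ') = pvIsDigi x := hgetlow _ (by omega)
      simp only [Nat.add_sub_cancel, List.getD] at h1 h2
      simp [Nat.succ_eq_add_one, h1, h2]
    rw [this]
  rw [hlow]
  have hhigh : (((List.range r.length).map (fun i => m + i)).filter
      (fun i => i == 0 || (pvIsDigi (cs.getD i ' ') != pvIsDigi (cs.getD (i - 1) ' ')))) =
      ((List.range r.length).filter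
        (fun i => i == 0 || (pvIsDigi (r.getD i ' ') != pvIsDigi (r.getD (i - 1) ' ')))).map
          (fun i => m + i) := by
    rw [List.filter_map]
    congr 1
    apply List.filter_congr
    intro i hi
    simp only [List.mem_range] at hi
    simp only [Function.comp]
    cases i with
    | zero =>
      have hc0 : cs.getD m ' ' = r.getD 0 ' ' := by simpa using hgethigh 0
      have hcm1 : pvIsDigi (cs.getD (m - 1) ' ') = pvIsDigi x := by
        have e : m - 1 = t.length := by rw [hm]; omega
        rw [e]; exact hgetlow t.length (by omega)
      have hhead : r.head? = some (r.getD 0 ' ') := by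
        cases r with
        | nil => simp at hi
        | cons a as => simp [List.getD]
      have hne := hr _ hhead
      have hz0 : (m + 0 == 0) = false := by
        simp only [beq_eq_false_iff_ne]; omega
      simp only [List.getD] at hc0 hcm1 hne
      simp [hz0, hc0, hcm1, hne]
    | succ j =>
      have h1 := hgethigh (j + 1)
      have h2 : cs.getD (m + (j + 1) - 1) ' ' = r.getD j ' ' := by
        have e : m + (j + 1) - 1 = m + j := by omega
        rw [e]; exact hgethigh j
      have hz : (m + (j + 1) == 0) = false := by
        simp only [beq_eq_false_iff_ne]; omega
      rw [hz, Bool.false_or, h1, h2]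
      simp
  rw [hhigh]
  have h3 : [m + r.length] = (List.map (fun i => m + i) [r.length]) := by simp
  rw [h3, List.append_assoc, ← List.map_append, List.singleton_append]
  have hf : (fun i => m + i) = (· + m) := by funext i; omega
  rw [hf]

theorem pvBCore_eq_aux (n : Nat) : ∀ cs : List Char, cs.length ≤ n → pvBCore cs = pvRuns cs := by
  induction n with
  | zero =>
    intro cs hcs
    have : cs = [] := List.length_eq_zero_iff.mp (Nat.le_zero.mp hcs)
    subst this; rw [pvRuns_nil]; rfl
  | succ n ih =>
    intro cs hcs
    cases cs with
    | nil => rw [pvRuns_nil]; rfl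
    | cons x rest =>
      set p : Char → Bool := fun d => pvIsDigi d == pvIsDigi x with hp
      set t := rest.takeWhile p with htdef
      set r := rest.dropWhile p with hrdef
      have hsplit : x :: rest = (x :: t) ++ r := by
        simp [htdef, hrdef, List.takeWhile_append_dropWhile]
      have ht : ∀ d ∈ t, pvIsDigi d = pvIsDigi x := by
        intro d hd
        have := List.mem_takeWhile_imp (htdef ▸ hd)
        simpa [hp] using this
      have hr : ∀ y, r.head? = some y → pvIsDigi y ≠ pvIsDigi x := by
        intro y hy
        have := pvHead_dropWhile p rest y (hrdef ▸ hy)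
        simpa [hp] using this
      have hrlen : r.length ≤ n := by
        have h1 : r.length ≤ rest.length := hrdef ▸ List.length_dropWhile_le p rest
        have h2 : rest.length ≤ n := by simpa using hcs
        omega
      have hcuts := pvCuts_cons x t r ht hr
      obtain ⟨qs, hq⟩ := pvCuts_head r
      rw [show pvRuns (x :: rest) = (x :: t) :: pvRuns r by rw [pvRuns_cons]]
      unfold pvBCore
      rw [show ((x : Char) :: rest : List Char) = (x :: t) ++ r from hsplit, hcuts, hq]
      simp only [List.map_cons, List.tail_cons, List.zip_cons_cons, List.map_cons]
      have hmain : ∀ (pr : List (Nat × Nat)),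
          pr.map ((fun q : Nat × Nat => (((x :: t) ++ r).drop q.1).take (q.2 - q.1)) ∘
            Prod.map (fun v => v + (t.length + 1)) (fun v => v + (t.length + 1))) =
          pr.map (fun q : Nat × Nat => (r.drop q.1).take (q.2 - q.1)) := by
        intro pr
        apply List.map_congr_left
        intro ⟨a, b⟩ _
        simp only [Function.comp, Prod.map]
        have hdrop : ((x :: t) ++ r).drop (a + (t.length + 1)) = r.drop a := by
          rw [List.drop_append]
          have h1 : (x :: t).length = t.length + 1 := by simp
          rw [h1]
          simp [show a + (t.length + 1) - (t.length + 1) = a by omega,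
            List.drop_of_length_le
              (by simp only [List.length_cons]; omega : (x :: t).length ≤ a + (t.length + 1))]
        have hsub : b + (t.length + 1) - (a + (t.length + 1)) = b - a := by omega
        rw [hdrop, hsub]
      have hfirst : (((x :: t) ++ r).drop 0).take (0 + (t.length + 1) - 0) = x :: t := by
        simp only [List.drop_zero, Nat.zero_add, Nat.sub_zero]
        rw [show t.length + 1 = (x :: t).length by simp, List.take_left]
      have hrest : (((0 + (t.length + 1)) ::
              List.map (fun v => v + (t.length + 1)) qs).zip
            (List.map (fun v => v + (t.length + 1)) qs)).map
            (fun q : Nat × Nat => (((x :: t) ++ r).drop q.1).take (q.2 - q.1)) = pvRuns r := by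
        have hz2 : ((0 + (t.length + 1)) :: List.map (fun v => v + (t.length + 1)) qs)
            = List.map (fun v => v + (t.length + 1)) (0 :: qs) := by simp
        rw [hz2, List.zip_map, List.map_map, hmain ((0 :: qs).zip qs), ← ih r hrlen]
        unfold pvBCore
        rw [hq]
        rfl
      rw [hfirst, hrest]

theorem digi_split_alt_eq_runs (texto : String) :
    digi_split_alt texto = (pvRuns texto.toList).map String.mk := by
  rw [digi_split_alt_eq_core, pvBCore_eq_aux texto.toList.length texto.toList (le_refl _)]

-- ===== VERDICT (by name: the statement is the Claim_ definition above) =====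
theorem digi_split_spec : Claim_equal_digi_split := by
  intro texto _
  unfold Spec_digi_split
  rw [digi_split_eq_runs, digi_split_alt_eq_runs]
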